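-- pv_equiv track=rewrite | github.com/Sudhanshu-Singh2704/BDA | kmeans.py | kmeans_map
-- ===== SOURCE A (Python) =====
-- def squared_distance(x, y):
--     """Squared distance for 1D points."""
--     return (x - y) ** 2
--
-- def kmeans_map(data, means):
--     mapped = []
--     for x in data:
--         # Find nearest mean
--         min_dist = float("inf")
--         closest_mean = None
--         for i, mu in enumerate(means):
--             dist = squared_distance(x, mu)
--             if dist < min_dist:
--                 min_dist = dist
--                 closest_mean = i
--         # Emit key-value (cluster_id, (x, 1))
--         mapped.append((closest_mean, (x, 1)))
--     return mapped
-- ===== SOURCE B (Python) =====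
-- def kmeans_map(data, means):
--     # Loop interchange: iterate means in the outer loop, maintaining a
--     # per-point (min_dist, closest_index) table updated for each mean.
--     best = [None] * len(data)  # per data point: (min_dist, closest_mean)
--     for i, mu in enumerate(means):
--         for j, x in enumerate(data):
--             d = (x - mu) ** 2
--             if best[j] is None or d < best[j][0]:
--                 best[j] = (d, i)
--     return [(b[1], (x, 1)) for b, x in zip(best, data)]
-- ===== Notes on version B (the rewrite author's own statement) =====
-- stated objective: alternative
-- what changed: Loops are interchanged: B iterates over the means in the outer loop and maintains a per-data-point table of (min_dist, closest_index), instead of A's per-point inner scan of all means; the result list is assembled from the table at the end.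
-- outside the precondition, e.g. on kmeans_map([1], []): A returns [(None, (1, 1))], B raises TypeError
import Mathlib
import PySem

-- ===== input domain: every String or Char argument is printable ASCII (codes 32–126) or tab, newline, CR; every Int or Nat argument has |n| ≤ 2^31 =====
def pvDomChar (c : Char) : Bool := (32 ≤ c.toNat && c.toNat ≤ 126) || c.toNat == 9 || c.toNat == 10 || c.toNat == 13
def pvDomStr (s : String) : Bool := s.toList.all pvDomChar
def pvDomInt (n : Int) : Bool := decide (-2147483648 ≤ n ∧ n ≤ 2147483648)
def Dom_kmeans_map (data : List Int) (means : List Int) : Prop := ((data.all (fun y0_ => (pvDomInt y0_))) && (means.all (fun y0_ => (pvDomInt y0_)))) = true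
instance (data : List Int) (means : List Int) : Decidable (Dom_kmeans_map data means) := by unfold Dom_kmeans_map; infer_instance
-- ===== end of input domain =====

-- B interchanges the two loops (means outer, maintaining a per-point best table); same O(n*k) cost, alternative structure; return-value equivalence only.

-- ===== PORT A =====
-- inner loop of A: state (min_dist, closest_mean), both None initially (None = float("inf") / no index yet)
def kmeansInnerA (x : Int) (means : List Int) : Option Int × Option Int :=
  (PySem.List.enumerate means).foldl
    (fun st p =>
      let dist := (x - p.2) ^ 2
      match st.1 with
      | none => (some dist, some p.1)
      | some md => if dist < md then (some dist, some p.1) else st)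
    (none, none)

-- Under Pre_ the closest index is always `some`; `.getD 0` never fires there.
def kmeans_map (data : List Int) (means : List Int) : List (Int × (Int × Int)) :=
  data.map (fun x => ((kmeansInnerA x means).2.getD 0, (x, 1)))

-- ===== PORT B =====
-- one sweep of B's inner loop: update every data point's best entry with mean number i (value mu)
def kmStepB (data : List Int) (best : List (Option (Int × Int))) (i : Int) (mu : Int) :
    List (Option (Int × Int)) :=
  (data.zip best).map (fun q =>
    let d := (q.1 - mu) ^ 2
    match q.2 with
    | none => some (d, i)
    | some b => if d < b.1 then some (d, i) else some b)

-- Under Pre_ every best entry is `some`; `.getD 0` never fires there.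
def kmeans_map_alt (data : List Int) (means : List Int) : List (Int × (Int × Int)) :=
  let best := (PySem.List.enumerate means).foldl
    (fun acc p => kmStepB data acc p.1 p.2) (data.map (fun _ => none))
  (best.zip data).map (fun q => ((q.1.map Prod.snd).getD 0, (q.2, 1)))

-- ===== PRECONDITION & SPEC =====
-- Pre_ excludes means = [] with nonempty data: there Python A RETURNS (None, (x, 1)) — None is not an
-- int, so A's value leaves the declared type — and Python B raises TypeError.
def Pre_kmeans_map (data : List Int) (means : List Int) : Prop := means ≠ [] ∨ data = []
instance (data : List Int) (means : List Int) : Decidable (Pre_kmeans_map data means) := by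
  unfold Pre_kmeans_map; infer_instance

def pvWitness_kmeans_map : List Int × List Int := ([3, -1, 7], [0, 5])

def Spec_kmeans_map (data : List Int) (means : List Int) (out : List (Int × (Int × Int))) : Prop :=
  out = kmeans_map_alt data means
instance (data : List Int) (means : List Int) (out : List (Int × (Int × Int))) :
    Decidable (Spec_kmeans_map data means out) := by unfold Spec_kmeans_map; infer_instance

-- ===== CLAIM (what is proved, stated in full; the proofs are below) =====
def Claim_equal_kmeans_map : Prop := ∀ (data : List Int) (means : List Int),
  Dom_kmeans_map data means → Pre_kmeans_map data means →
  Spec_kmeans_map data means (kmeans_map data means)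

-- ===== LEMMAS AND PROOFS =====

-- per-point step function: what one mean does to one data point's best entry
def kmPStep (x : Int) (p : Int × Int) (b : Option (Int × Int)) : Option (Int × Int) :=
  let d := (x - p.2) ^ 2
  match b with
  | none => some (d, p.1)
  | some bb => if d < bb.1 then some (d, p.1) else some bb

theorem km_zip_map {α β γ : Type} (g : α → β) (F : α × β → γ) (xs : List α) :
    ((xs.zip (xs.map g)).map F) = xs.map (fun x => F (x, g x)) := by
  induction xs with
  | nil => rfl
  | cons a t ih =>
      simp only [List.zip] at ih ⊢
      simp [ih]

theorem km_zip_map_left {α β γ : Type} (g : α → β) (F : β × α → γ) (xs : List α) :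
    (((xs.map g).zip xs).map F) = xs.map (fun x => F (g x, x)) := by
  induction xs with
  | nil => rfl
  | cons a t ih =>
      simp only [List.zip] at ih ⊢
      simp [ih]

theorem km_step_map (data : List Int) (g : Int → Option (Int × Int)) (i mu : Int) :
    kmStepB data (data.map g) i mu = data.map (fun x => kmPStep x (i, mu) (g x)) := by
  unfold kmStepB
  rw [km_zip_map]
  rfl

-- loop interchange: folding the sweep over the means = per point, folding the means
theorem km_interchange (ps : List (Int × Int)) (data : List Int) (g : Int → Option (Int × Int)) :
    ps.foldl (fun acc p => kmStepB data acc p.1 p.2) (data.map g)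
      = data.map (fun x => ps.foldl (fun b p => kmPStep x p b) (g x)) := by
  induction ps generalizing g with
  | nil => rfl
  | cons p t ih =>
      simp only [List.foldl_cons, km_step_map]
      exact ih (fun x => kmPStep x (p.1, p.2) (g x))

-- A's paired-options state is the image of B's single-option state
theorem km_conv (x : Int) (ps : List (Int × Int)) (b : Option (Int × Int)) :
    ps.foldl
      (fun st p =>
        let dist := (x - p.2) ^ 2
        match st.1 with
        | none => (some dist, some p.1)
        | some md => if dist < md then (some dist, some p.1) else st)
      (b.map Prod.fst, b.map Prod.snd)
      = ((ps.foldl (fun b p => kmPStep x p b) b).map Prod.fst,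
         (ps.foldl (fun b p => kmPStep x p b) b).map Prod.snd) := by
  induction ps generalizing b with
  | nil => rfl
  | cons p t ih =>
      have hstep :
          (let dist := (x - p.2) ^ 2
           match (b.map Prod.fst : Option Int) with
           | none => (some dist, some p.1)
           | some md => if dist < md then (some dist, some p.1)
                        else (b.map Prod.fst, b.map Prod.snd))
            = ((kmPStep x p b).map Prod.fst, (kmPStep x p b).map Prod.snd) := by
        cases b with
        | none => rfl
        | some bb =>
            simp only [kmPStep, Option.map_some]
            split_ifs <;> rfl
      simp only [List.foldl_cons, hstep]
      exact ih (kmPStep x p b)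

theorem kmeans_inner_eq (x : Int) (means : List Int) :
    (kmeansInnerA x means).2
      = ((PySem.List.enumerate means).foldl (fun b p => kmPStep x p b) none).map Prod.snd := by
  unfold kmeansInnerA
  have := km_conv x (PySem.List.enumerate means) none
  simp only [Option.map_none] at this
  rw [this]

-- ===== VERDICT (by name: the statement is the Claim_ definition above) =====
theorem kmeans_map_spec : Claim_equal_kmeans_map := by
  intro data means _ _
  unfold Spec_kmeans_map
  simp only [kmeans_map, kmeans_map_alt, km_interchange, km_zip_map_left]
  exact List.map_congr_left fun x _ => by rw [kmeans_inner_eq]
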